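-- pv_equiv track=rewrite | github.com/ggsmith842/algorithms | Graph Algorithms/common_parent_search.py | find_common_parent
-- ===== SOURCE A (Python) =====
-- def find_common_parent(graph, node1, node2):
--     """
--     Finds the common parent node of two given nodes in a graph.
--
--     Args:
--         graph: A dictionary representation of the graph.
--         node1: The first node.
--         node2: The second node.
--
--     Returns:
--         The common parent node of node1 and node2, or None if there is no common parent.
--     """
--
--
--     stack = [node1]
--     parents = set()
--
--     #find all of node1 parents
--     while stack:
--         node = stack.pop()
--         for parent, children in graph.items():
--             if node in children:
--                 parents.add(parent)
--                 stack.append(parent)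
--
--     #find all of node2 parents
--     parents2 = set()
--     stack = [node2]
--     while stack:
--         node = stack.pop()
--         for parent, children in graph.items():
--             if node in children:
--                 parents2.add(parent)
--                 stack.append(parent)
--
--     #Find the intersection of the two parents
--     common_parent = parents.intersection(parents2)
--
--     return common_parent
-- ===== SOURCE B (Python) =====
-- def find_common_parent(graph, node1, node2):
--     # Build a child -> parents reverse index once, so each stack pop is a
--     # single dict lookup instead of a scan over the whole graph.
--     parents_of = {}
--     for parent, children in graph.items():
--         for child in dict.fromkeys(children):
--             parents_of.setdefault(child, []).append(parent)
--
--     def ancestors(start):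
--         anc = set()
--         stack = [start]
--         while stack:
--             node = stack.pop()
--             for parent in parents_of.get(node, ()):
--                 anc.add(parent)
--                 stack.append(parent)
--         return anc
--
--     return ancestors(node1) & ancestors(node2)
-- ===== Notes on version B (the rewrite author's own statement) =====
-- stated objective: alternative
-- what changed: B builds a child-to-parents reverse index in one pass over the graph and each stack pop then does a single dict lookup, where A rescans every (parent, children) item with a membership test on every pop; the returned set is identical.
import Mathlib
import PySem

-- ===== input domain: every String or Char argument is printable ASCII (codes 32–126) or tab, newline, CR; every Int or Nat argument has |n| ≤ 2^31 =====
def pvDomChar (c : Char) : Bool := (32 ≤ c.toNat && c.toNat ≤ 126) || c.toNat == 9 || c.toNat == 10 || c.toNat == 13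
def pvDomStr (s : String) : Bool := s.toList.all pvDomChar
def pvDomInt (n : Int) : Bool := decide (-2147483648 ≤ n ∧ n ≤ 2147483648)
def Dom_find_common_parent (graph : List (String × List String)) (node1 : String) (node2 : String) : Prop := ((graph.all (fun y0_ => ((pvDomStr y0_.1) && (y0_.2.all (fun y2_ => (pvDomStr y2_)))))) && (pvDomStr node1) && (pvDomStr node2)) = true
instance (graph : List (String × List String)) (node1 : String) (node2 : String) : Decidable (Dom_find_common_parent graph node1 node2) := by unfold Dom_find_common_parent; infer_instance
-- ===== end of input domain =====

-- B replaces A's per-pop scan of the whole graph by a child→parents reverse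
-- index built once; same return value (the set of common ancestors).

-- ===== PORT A =====
-- Python's while-loop is unbounded; the port runs it on a fuel budget far above
-- the iteration count of any run the Python completes (the recursion stops as
-- soon as the stack empties, exactly like the Python).
def pvFuel_find_common_parent (graph : List (String × List String)) : Nat :=
  (graph.length + 2) ^ (graph.length + 2)

-- the while-loop of A; the stack is held top-first (Python's append = cons, pop = head)
def pvLoopA (graph : List (String × List String)) :
    Nat → List String → PySem.Set String → PySem.Set String
  | 0, _, parents => parents
  | _ + 1, [], parents => parents
  | f + 1, node :: rest, parents =>
      -- for parent, children in graph.items(): if node in children: parents.add(parent); stack.append(parent)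
      let st := graph.foldl
        (fun (acc : PySem.Set String × List String) pc =>
          if pc.2.contains node then (PySem.Set.add acc.1 pc.1, pc.1 :: acc.2) else acc)
        (parents, rest)
      pvLoopA graph f st.2 st.1

def find_common_parent (graph : List (String × List String)) (node1 : String) (node2 : String) : List String :=
  let parents := pvLoopA graph (pvFuel_find_common_parent graph) [node1] PySem.Set.empty
  let parents2 := pvLoopA graph (pvFuel_find_common_parent graph) [node2] PySem.Set.empty
  PySem.Set.inter parents parents2

-- ===== PORT B =====
-- parents_of: for parent, children in graph: for child in dict.fromkeys(children): parents_of.setdefault(child, []).append(parent)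
def pvRev (graph : List (String × List String)) : PySem.Dict String (List String) :=
  graph.foldl
    (fun d pc =>
      (PySem.List.dedup pc.2).foldl (fun d c => d.modify c [] (fun l => l ++ [pc.1])) d)
    PySem.Dict.empty

-- the while-loop of B (stack top-first, as in port A)
def pvLoopB (rev : PySem.Dict String (List String)) :
    Nat → List String → PySem.Set String → PySem.Set String
  | 0, _, anc => anc
  | _ + 1, [], anc => anc
  | f + 1, node :: rest, anc =>
      -- for parent in parents_of.get(node, ()): anc.add(parent); stack.append(parent)
      let st := (rev.getD node []).foldl
        (fun (acc : PySem.Set String × List String) p => (PySem.Set.add acc.1 p, p :: acc.2))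
        (anc, rest)
      pvLoopB rev f st.2 st.1

def find_common_parent_alt (graph : List (String × List String)) (node1 : String) (node2 : String) : List String :=
  let rev := pvRev graph
  let anc1 := pvLoopB rev (pvFuel_find_common_parent graph) [node1] PySem.Set.empty
  let anc2 := pvLoopB rev (pvFuel_find_common_parent graph) [node2] PySem.Set.empty
  PySem.Set.inter anc1 anc2

-- ===== PRECONDITION & SPEC =====
def Spec_find_common_parent (graph : List (String × List String)) (node1 : String) (node2 : String) (out : List String) : Prop := out = find_common_parent_alt graph node1 node2
instance (graph : List (String × List String)) (node1 : String) (node2 : String) (out : List String) : Decidable (Spec_find_common_parent graph node1 node2 out) := by unfold Spec_find_common_parent; infer_instance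

-- ===== CLAIM (what is proved, stated in full; the proofs are below) =====
def Claim_equal_find_common_parent : Prop := ∀ (graph : List (String × List String)) (node1 : String) (node2 : String), Dom_find_common_parent graph node1 node2 → Spec_find_common_parent graph node1 node2 (find_common_parent graph node1 node2)

-- ===== LEMMAS AND PROOFS =====

-- the parents of n listed by one scan of the graph (proof-side characterisation)
def pvParents (graph : List (String × List String)) (n : String) : List String :=
  (graph.filter (fun pc => pc.2.contains n)).map (·.1)

-- A's scan over the graph, started at (parents, stack), adds and pushes exactly pvParents
lemma pvLoopA_scan (node : String) :
    ∀ (graph : List (String × List String)) (pr : PySem.Set String) (st : List String),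
      graph.foldl
        (fun (acc : PySem.Set String × List String) pc =>
          if pc.2.contains node then (PySem.Set.add acc.1 pc.1, pc.1 :: acc.2) else acc)
        (pr, st)
      = (pvParents graph node).foldl
          (fun (acc : PySem.Set String × List String) p => (PySem.Set.add acc.1 p, p :: acc.2))
          (pr, st) := by
  intro graph
  induction graph with
  | nil => intro pr st; simp [pvParents]
  | cons pc rest ih =>
      intro pr st
      by_cases h : pc.2.contains node
      · simp only [pvParents, List.filter_cons, h, List.foldl_cons, if_true]
        simpa [pvParents] using ih (PySem.Set.add pr pc.1) (pc.1 :: st)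
      · simp only [pvParents, List.filter_cons, h, List.foldl_cons]
        simpa [pvParents] using ih pr st

-- for a duplicate-free list, tagging each element with p and filtering on c keeps at most one pair
lemma pvFilter_map_pair (p c : String) :
    ∀ (l : List String), l.Nodup →
      ((l.map (fun x => (x, p))).filter (fun q => q.1 == c)).map (·.2)
        = if c ∈ l then [p] else [] := by
  intro l
  induction l with
  | nil => simp
  | cons x xs ih =>
      intro hnd
      rcases List.nodup_cons.mp hnd with ⟨hx, hxs⟩
      by_cases hcx : x == c
      · have hc : x = c := by simpa using hcx
        subst hc
        simp [ih hxs, hx]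
      · have hne : c ≠ x := by
          intro h; exact hcx (by simp [h])
        simp [hcx, ih hxs, hne]

-- the reverse index lists, for each node, exactly the parents A's scan finds, in the same order
lemma pvRev_getD (graph : List (String × List String)) (n : String) :
    (pvRev graph).getD n [] = pvParents graph n := by
  suffices h : ∀ (d : PySem.Dict String (List String)),
      (graph.foldl
        (fun d pc =>
          (PySem.List.dedup pc.2).foldl (fun d c => d.modify c [] (fun l => l ++ [pc.1])) d)
        d).getD n []
      = d.getD n [] ++ pvParents graph n by
    simpa [pvRev] using h PySem.Dict.empty
  induction graph with
  | nil => intro d; simp [pvParents]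
  | cons pc rest ih =>
      intro d
      have inner :
          ((PySem.List.dedup pc.2).foldl (fun d c => d.modify c [] (fun l => l ++ [pc.1])) d).getD n []
            = d.getD n [] ++ (if pc.2.contains n then [pc.1] else []) := by
        have h1 :
            (PySem.List.dedup pc.2).foldl (fun d c => d.modify c [] (fun l => l ++ [pc.1])) d
              = ((PySem.List.dedup pc.2).map (fun c => (c, pc.1))).foldl
                  (fun d q => d.modify q.1 [] (fun l => l ++ [q.2])) d := by
          rw [List.foldl_map]
        rw [h1, PySem.Dict.getD_foldl_modify_append]
        rw [pvFilter_map_pair pc.1 n _ (PySem.List.nodup_dedup pc.2)]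
        simp
      simp only [List.foldl_cons, ih, inner, pvParents, List.filter_cons]
      by_cases h : n ∈ pc.2 <;> simp [h]

-- the two while-loops run in lockstep
lemma pvLoop_eq (graph : List (String × List String)) :
    ∀ (f : Nat) (st : List String) (pr : PySem.Set String),
      pvLoopA graph f st pr = pvLoopB (pvRev graph) f st pr := by
  intro f
  induction f with
  | zero => intro st pr; rfl
  | succ f ih =>
      intro st pr
      cases st with
      | nil => rfl
      | cons node rest =>
          simp only [pvLoopA, pvLoopB, pvLoopA_scan node graph pr rest, pvRev_getD graph node]
          exact ih _ _

-- ===== VERDICT (by name: the statement is the Claim_ definition above) =====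
theorem find_common_parent_spec : Claim_equal_find_common_parent := by
  intro graph node1 node2 _
  unfold Spec_find_common_parent find_common_parent find_common_parent_alt
  rw [pvLoop_eq, pvLoop_eq]
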